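-- pv_equiv track=rewrite | github.com/Klaudia1303/student_code_analysis | Progetto-tirocinio2024/data/student_data/2059118_Pernasili/LabPython08/A_Ex1.py | A_Ex1
-- ===== SOURCE A (Python) =====
-- def A_Ex1(l):
--    mas=0
--    cmas="A"
--    for i in range(len(l)):
--        elem=l[i]
--        for k in range(len(elem)):
--            a=elem[k]
--            c=0
--            for j in range(len(l)):
--                if a in l[j] and j != i and elem[k].islower():
--                    c = c+1
--            if c>mas:
--                mas= c
--                cmas=a
--            elif mas==c:
--                if a>cmas:
--                    cmas=a
--    return cmas
-- ===== SOURCE B (Python) =====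
-- def A_Ex1(l):
--     cand = set("".join(l)) | {"A"}
--     def score(ch):
--         return sum(ch in s for s in l) - 1 if ch.islower() else 0
--     return max(cand, key=lambda ch: (score(ch), ch))
-- ===== Notes on version B (the rewrite author's own statement) =====
-- stated objective: faster
-- what changed: A rescans the whole list for every character occurrence of every string (triple nested loops); B builds the set of distinct characters once, scores each candidate (count of containing strings minus 1 if lowercase, else 0) in a single pass, and returns max(candidates | {'A'}, key=(score, char)).
import Mathlib
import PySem

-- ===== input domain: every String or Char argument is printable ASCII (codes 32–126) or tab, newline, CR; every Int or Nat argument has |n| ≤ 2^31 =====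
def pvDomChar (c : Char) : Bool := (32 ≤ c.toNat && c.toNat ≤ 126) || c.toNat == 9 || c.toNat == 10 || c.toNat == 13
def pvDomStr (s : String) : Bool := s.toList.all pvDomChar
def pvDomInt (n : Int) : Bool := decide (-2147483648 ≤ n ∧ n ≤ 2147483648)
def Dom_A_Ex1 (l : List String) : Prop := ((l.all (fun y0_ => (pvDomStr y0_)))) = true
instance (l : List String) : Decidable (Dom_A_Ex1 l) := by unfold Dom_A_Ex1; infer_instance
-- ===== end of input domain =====

-- B replaces A's triple nested occurrence loops by one pass over the distinct characters, each scored by one count over the list (objective: faster; measurably so in a timing run).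

-- ===== PORT A =====
-- Transliteration of A. The 1-character Python strings a/cmas are modeled as Char
-- (Python's '<', 'in', '.islower()' on 1-char strings coincide with the Char operations);
-- the final value is wrapped back into a String.
def A_Ex1 (l : List String) : String :=
  let r := (PySem.List.pyRange 0 (l.length : Int) 1).foldl (fun (st : Int × Char) i =>
    let elem := (PySem.List.pyGetD l i "").toList
    (PySem.List.pyRange 0 (elem.length : Int) 1).foldl (fun (st : Int × Char) k =>
      let a := PySem.List.pyGetD elem k ' '
      let c := (PySem.List.pyRange 0 (l.length : Int) 1).foldl (fun (c : Int) j =>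
        if PySem.Chars.isIn [a] (PySem.List.pyGetD l j "").toList && !(j == i) && PySem.Chars.islower a then c + 1 else c) 0
      if c > st.1 then (c, a)
      else if st.1 = c then (if a > st.2 then (st.1, a) else st)
      else st) st) ((0 : Int), 'A')
  String.ofList [r.2]

-- ===== PORT B =====
-- Transliteration of Source B: candidates = set("".join(l)) | {"A"}; key ch = (score ch, ch);
-- max(cand, key=…).  'A' is always a candidate, so Python's max never sees an empty
-- sequence; maxD's default argument is therefore never used.
def A_Ex1_alt (l : List String) : String :=
  let cand : PySem.Set Char :=
    PySem.Set.union (PySem.Set.ofList (PySem.Str.join "" l).toList) (PySem.Set.ofList ['A'])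
  let key := fun (ch : Char) =>
    toLex (if PySem.Chars.islower ch then
             (l.map (fun s => if PySem.Chars.isIn [ch] s.toList then (1 : Int) else 0)).sum - 1
           else 0, ch)
  String.ofList [PySem.List.maxD cand key 'A']

-- ===== PRECONDITION & SPEC =====
def Spec_A_Ex1 (l : List String) (out : String) : Prop := out = A_Ex1_alt l
instance (l : List String) (out : String) : Decidable (Spec_A_Ex1 l out) := by unfold Spec_A_Ex1; infer_instance

-- ===== CLAIM (what is proved, stated in full; the proofs are below) =====
def Claim_equal_A_Ex1 : Prop := ∀ (l : List String), Dom_A_Ex1 l → Spec_A_Ex1 l (A_Ex1 l)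

-- ===== LEMMAS AND PROOFS =====

-- number of strings of l that contain the character a
def pvCnt (l : List String) (a : Char) : Nat := l.countP (fun s => PySem.Chars.isIn [a] s.toList)

-- the score A effectively assigns to an occurrence of a (inside one of l's strings)
def pvScore (l : List String) (a : Char) : Int :=
  if PySem.Chars.islower a then (pvCnt l a : Int) - 1 else 0

def pvKey (l : List String) (a : Char) : Lex (Int × Char) := toLex (pvScore l a, a)

def pvChars (l : List String) : List Char := (l.map String.toList).flatten

lemma pv_countLoop (l : List String) (i : Int) (hi0 : 0 ≤ i) (hin : i < (l.length : Int))
    (a : Char) (ha : a ∈ (PySem.List.pyGetD l i "").toList) :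
    (PySem.List.pyRange 0 (l.length : Int) 1).foldl (fun (c : Int) j =>
      if PySem.Chars.isIn [a] (PySem.List.pyGetD l j "").toList && !(j == i) && PySem.Chars.islower a then c + 1 else c) 0
    = pvScore l a := by
  rw [PySem.List.foldl_count_if]
  by_cases hlow : PySem.Chars.islower a
  case neg => simp [pvScore, hlow]
  case pos =>
  simp only [pvScore, hlow, Bool.and_true, if_true]
  have hax : PySem.Chars.isIn [a] (PySem.List.pyGetD l i "").toList = true :=
    (PySem.Chars.isIn_iff_infix _ _).mpr ((List.singleton_infix_iff a _).mpr ha)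
  have hsplit : PySem.List.pyRange 0 (l.length : Int) 1
      = PySem.List.pyRange 0 i 1 ++ i :: PySem.List.pyRange (i+1) (l.length : Int) 1 := by
    rw [PySem.List.pyRange_one_append 0 i _ hi0 (le_of_lt hin), PySem.List.pyRange_one_cons hin]
  have hfull : (PySem.List.pyRange 0 (l.length : Int) 1).countP
      (fun j => PySem.Chars.isIn [a] (PySem.List.pyGetD l j "").toList) = pvCnt l a := by
    conv_rhs => rw [pvCnt, ← PySem.List.map_pyGetD_pyRange_zero' l "", List.countP_map]
    rfl
  have hcongL : (PySem.List.pyRange 0 i 1).countP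
        (fun j => PySem.Chars.isIn [a] (PySem.List.pyGetD l j "").toList && !(j == i))
      = (PySem.List.pyRange 0 i 1).countP
        (fun j => PySem.Chars.isIn [a] (PySem.List.pyGetD l j "").toList) := by
    apply List.countP_congr
    intro j hj
    have hb := PySem.List.mem_pyRange_one.mp hj
    have : (j == i) = false := by simp; omega
    simp [this]
  have hcongR : (PySem.List.pyRange (i+1) (l.length : Int) 1).countP
        (fun j => PySem.Chars.isIn [a] (PySem.List.pyGetD l j "").toList && !(j == i))
      = (PySem.List.pyRange (i+1) (l.length : Int) 1).countP
        (fun j => PySem.Chars.isIn [a] (PySem.List.pyGetD l j "").toList) := by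
    apply List.countP_congr
    intro j hj
    have hb := PySem.List.mem_pyRange_one.mp hj
    have : (j == i) = false := by simp; omega
    simp [this]
  rw [hsplit] at hfull ⊢
  simp only [List.countP_append, List.countP_cons, hax, beq_self_eq_true, Bool.not_true,
    Bool.and_false, Bool.false_eq_true, reduceIte, hcongL, hcongR] at hfull ⊢
  omega

lemma pv_stepPair (st : Int × Char) (c : Int) (a : Char) :
    (if c > st.1 then (c, a)
     else if st.1 = c then (if a > st.2 then (st.1, a) else st)
     else st)
    = ofLex (max (toLex st) (toLex (c, a))) := by
  rcases st with ⟨m, b⟩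
  rcases lt_trichotomy m c with h1 | h1 | h1
  · rw [max_eq_right (le_of_lt (Prod.Lex.lt_iff.mpr (Or.inl h1)))]
    simp [h1]
  · subst h1
    rcases lt_trichotomy b a with h2 | h2 | h2
    · rw [max_eq_right (show toLex ((m, b) : Int × Char) ≤ toLex (m, a) from
        le_of_lt (Prod.Lex.lt_iff.mpr (Or.inr ⟨rfl, h2⟩)))]
      simp [h2]
    · subst h2
      simp
    · rw [max_eq_left (show toLex ((m, a) : Int × Char) ≤ toLex (m, b) from
        le_of_lt (Prod.Lex.lt_iff.mpr (Or.inr ⟨rfl, h2⟩)))]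
      simp [not_lt.mpr (le_of_lt h2)]
  · rw [max_eq_left (le_of_lt (Prod.Lex.lt_iff.mpr (Or.inl h1)))]
    simp [not_lt.mpr (le_of_lt h1), (ne_of_lt h1).symm]

lemma pv_innerFold (l : List String) (i : Int) (hi0 : 0 ≤ i) (hin : i < (l.length : Int))
    (cs : List Char) (hsub : ∀ a ∈ cs, a ∈ (PySem.List.pyGetD l i "").toList) (st : Int × Char) :
    cs.foldl (fun st a =>
      let c := (PySem.List.pyRange 0 (l.length : Int) 1).foldl (fun (c : Int) j =>
        if PySem.Chars.isIn [a] (PySem.List.pyGetD l j "").toList && !(j == i) && PySem.Chars.islower a then c + 1 else c) 0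
      if c > st.1 then (c, a) else if st.1 = c then (if a > st.2 then (st.1, a) else st) else st) st
    = ofLex ((cs.map (pvKey l)).foldl max (toLex st)) := by
  induction cs generalizing st with
  | nil => simp
  | cons a cs ih =>
    simp only [List.foldl_cons, List.map_cons]
    rw [pv_countLoop l i hi0 hin a (hsub a List.mem_cons_self),
      pv_stepPair st (pvScore l a) a,
      ih (fun b hb => hsub b (List.mem_cons_of_mem _ hb))]
    simp [pvKey]

lemma pv_foldl_strings (l0 : List String) (l : List String) (st : Int × Char) :
    l.foldl (fun st s => ofLex ((s.toList.map (pvKey l0)).foldl max (toLex st))) st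
    = ofLex (((l.map (fun s => s.toList.map (pvKey l0))).flatten).foldl max (toLex st)) := by
  induction l generalizing st with
  | nil => simp
  | cons s t ih =>
    simp only [List.foldl_cons, List.map_cons, List.flatten_cons, List.foldl_append]
    rw [ih]
    simp

lemma pv_A_eq (l : List String) :
    A_Ex1 l = String.ofList [(ofLex (((pvChars l).map (pvKey l)).foldl max (toLex ((0:Int), 'A')))).2] := by
  have hcong : ∀ (acc : Int × Char), ∀ x ∈ PySem.List.pyRange 0 (l.length : Int) 1,
      (let elem := (PySem.List.pyGetD l x "").toList
       (PySem.List.pyRange 0 (elem.length : Int) 1).foldl (fun (st : Int × Char) k =>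
         let a := PySem.List.pyGetD elem k ' '
         let c := (PySem.List.pyRange 0 (l.length : Int) 1).foldl (fun (c : Int) j =>
           if PySem.Chars.isIn [a] (PySem.List.pyGetD l j "").toList && !(j == x) && PySem.Chars.islower a then c + 1 else c) 0
         if c > st.1 then (c, a)
         else if st.1 = c then (if a > st.2 then (st.1, a) else st)
         else st) acc)
      = ofLex (((PySem.List.pyGetD l x "").toList.map (pvKey l)).foldl max (toLex acc)) := by
    intro acc x hx
    obtain ⟨hx0, hxn⟩ := PySem.List.mem_pyRange_one.mp hx
    exact (PySem.List.foldl_pyRange_zero_pyGetD' ((PySem.List.pyGetD l x "").toList) ' '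
        (fun (st : Int × Char) a =>
          let c := (PySem.List.pyRange 0 (l.length : Int) 1).foldl (fun (c : Int) j =>
            if PySem.Chars.isIn [a] (PySem.List.pyGetD l j "").toList && !(j == x) && PySem.Chars.islower a then c + 1 else c) 0
          if c > st.1 then (c, a) else if st.1 = c then (if a > st.2 then (st.1, a) else st) else st) acc).trans
      (pv_innerFold l x hx0 hxn _ (fun a ha => ha) acc)
  unfold A_Ex1
  rw [PySem.List.foldl_congr_mem _ _ _ _ hcong,
    PySem.List.foldl_pyRange_zero_pyGetD' l ""
      (fun (st : Int × Char) s => ofLex ((s.toList.map (pvKey l)).foldl max (toLex st))) _,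
    pv_foldl_strings l l]
  simp only [pvChars, List.map_flatten, List.map_map]
  rfl

lemma pv_foldl_max_mem {κ : Type} [LinearOrder κ] (ks : List κ) (s : κ) :
    ks.foldl max s = s ∨ ks.foldl max s ∈ ks := by
  induction ks generalizing s with
  | nil => simp
  | cons a t ih =>
    simp only [List.foldl_cons]
    rcases ih (max s a) with h | h
    · rcases max_choice s a with h2 | h2
      · exact Or.inl (h.trans h2)
      · exact Or.inr (List.mem_cons.mpr (Or.inl (h.trans h2)))
    · exact Or.inr (List.mem_cons.mpr (Or.inr h))

lemma pv_B_eq (l : List String) : ∃ r : Char,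
    A_Ex1_alt l = String.ofList [r] ∧ r ∈ 'A' :: pvChars l ∧
      ∀ x ∈ 'A' :: pvChars l, pvKey l x ≤ pvKey l r := by
  have hkey : (fun (ch : Char) =>
      toLex (if PySem.Chars.islower ch then
               (l.map (fun s => if PySem.Chars.isIn [ch] s.toList then (1 : Int) else 0)).sum - 1
             else 0, ch)) = pvKey l := by
    funext ch
    rw [PySem.List.sum_map_ite_one_zero]
    rfl
  have hmemiff : ∀ x : Char,
      (x ∈ PySem.Set.union (PySem.Set.ofList (PySem.Str.join "" l).toList) (PySem.Set.ofList ['A']))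
        ↔ x ∈ 'A' :: pvChars l := by
    intro x
    rw [PySem.Set.mem_union, PySem.Set.mem_ofList, PySem.Set.mem_ofList, PySem.Str.toList_join]
    have hj : PySem.Chars.join "".toList (l.map String.toList) = (l.map String.toList).flatten := by
      show [].intercalate (l.map String.toList) = _
      generalize (l.map String.toList) = L
      induction L with
      | nil => rfl
      | cons x t ih =>
        cases t with
        | nil => simp [List.intercalate]
        | cons y u =>
          simp only [List.intercalate, List.intersperse] at ih ⊢
          simp_all
    rw [hj]
    simp [pvChars, List.mem_cons, or_comm]
  unfold A_Ex1_alt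
  simp only [hkey]
  have hA : 'A' ∈ PySem.Set.union (PySem.Set.ofList (PySem.Str.join "" l).toList) (PySem.Set.ofList ['A']) :=
    (hmemiff 'A').mpr List.mem_cons_self
  obtain ⟨m, hm⟩ : ∃ m, PySem.List.max?
      (PySem.Set.union (PySem.Set.ofList (PySem.Str.join "" l).toList) (PySem.Set.ofList ['A'])) (pvKey l) = some m := by
    cases h : PySem.List.max?
        (PySem.Set.union (PySem.Set.ofList (PySem.Str.join "" l).toList) (PySem.Set.ofList ['A'])) (pvKey l) with
    | none =>
      have := (PySem.List.max?_eq_none_iff _ _).mp h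
      rw [this] at hA
      cases hA
    | some m => exact ⟨m, rfl⟩
  refine ⟨m, ?_, (hmemiff m).mp (PySem.List.max?_mem hm), ?_⟩
  · rw [PySem.List.maxD, hm]
    rfl
  · intro x hx
    exact PySem.List.max?_isMax hm x ((hmemiff x).mpr hx)

-- ===== VERDICT (by name: the statement is the Claim_ definition above) =====
theorem A_Ex1_spec : Claim_equal_A_Ex1 := by
  intro l _hd
  show A_Ex1 l = A_Ex1_alt l
  obtain ⟨r, hB, hmem, hub⟩ := pv_B_eq l
  have hseed : toLex ((0:Int), 'A') = pvKey l 'A' := by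
    simp [pvKey, pvScore, (by decide : PySem.Chars.islower 'A' = false)]
  rw [pv_A_eq l, hB]
  set K := ((pvChars l).map (pvKey l)).foldl max (toLex ((0:Int), 'A')) with hK
  have hbounds := PySem.List.le_foldl_max ((pvChars l).map (pvKey l)) (toLex ((0:Int), 'A'))
  -- K is an upper bound of pvKey over 'A' :: pvChars l
  have hKub : ∀ x ∈ 'A' :: pvChars l, pvKey l x ≤ K := by
    intro x hx
    rcases List.mem_cons.mp hx with rfl | hx
    · rw [← hseed]; exact hbounds.1
    · exact hbounds.2 _ (List.mem_map_of_mem hx)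
  -- K is attained: K = pvKey l x0 for some x0 ∈ 'A' :: pvChars l
  obtain ⟨x0, hx0mem, hx0⟩ : ∃ x0, x0 ∈ 'A' :: pvChars l ∧ K = pvKey l x0 := by
    rcases pv_foldl_max_mem ((pvChars l).map (pvKey l)) (toLex ((0:Int), 'A')) with h | h
    · exact ⟨'A', List.mem_cons_self, by rw [hK, h, hseed]⟩
    · obtain ⟨x0, hx0, he⟩ := List.mem_map.mp h
      exact ⟨x0, List.mem_cons_of_mem _ hx0, (hK ▸ he.symm)⟩
  have : K = pvKey l r := le_antisymm (hx0 ▸ hub x0 hx0mem) (hKub r hmem)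
  rw [this]
  rfl
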